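-- pv_equiv track=rewrite | github.com/Parag81/Coding-Practice | 95. Sales by Match.py | solve
-- ===== SOURCE A (Python) =====
-- def solve(lst):
--     d = {}
--     for ele in lst:
--         if ele not in d:
--             d[ele] = 1
--         else:
--             d[ele] += 1
--     pair = 0
--     for ele in d:
--         v = d[ele]//2
--         pair += v
--     return pair
-- ===== SOURCE B (Python) =====
-- def solve(lst):
--     s = sorted(lst)
--     pair = 0
--     i = 0
--     n = len(s)
--     while i + 1 < n:
--         if s[i] == s[i + 1]:
--             pair += 1
--             i += 2
--         else:
--             i += 1
--     return pair
-- ===== Notes on version B (the rewrite author's own statement) =====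
-- stated objective: alternative
-- what changed: Replaces the frequency-dictionary (build counts, then sum count//2 over keys) with a sort followed by a single greedy scan that pairs consecutive equal elements.
import Mathlib
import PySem

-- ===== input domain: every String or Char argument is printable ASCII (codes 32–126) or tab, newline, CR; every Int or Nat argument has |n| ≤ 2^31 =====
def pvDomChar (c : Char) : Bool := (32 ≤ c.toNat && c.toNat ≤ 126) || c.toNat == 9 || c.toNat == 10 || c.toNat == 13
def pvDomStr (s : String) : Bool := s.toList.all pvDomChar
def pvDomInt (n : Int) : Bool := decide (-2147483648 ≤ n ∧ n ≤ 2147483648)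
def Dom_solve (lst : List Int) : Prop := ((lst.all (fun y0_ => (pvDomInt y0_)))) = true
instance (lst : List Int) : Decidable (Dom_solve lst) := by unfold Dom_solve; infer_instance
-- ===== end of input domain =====

-- B replaces A's frequency dictionary with sort + one greedy scan pairing consecutive equal
-- elements (alternative decomposition, same results).

-- ===== PORT A =====
-- d[ele] += 1 / the read d[ele] in the second loop: the key is always present there
-- (first branch / iterating d's own keys), so Dict.getD is exact.
def solve (lst : List Int) : Int :=
  let d : PySem.Dict Int Int := lst.foldl
    (fun d ele =>
      if d.contains ele = false then d.insert ele 1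
      else d.insert ele (d.getD ele 0 + 1)) PySem.Dict.empty
  d.keys.foldl (fun pair ele => pair + PySem.Int.floordiv (d.getD ele 0) 2) 0

-- ===== PORT B =====
-- the while loop over indices i / i+1 of the sorted list, as recursion on the list
def pairsScan : List Int → Int
  | x :: y :: rest => if x = y then 1 + pairsScan rest else pairsScan (y :: rest)
  | _ => 0

def solve_alt (lst : List Int) : Int :=
  pairsScan (PySem.List.sorted lst (fun x => x) false)

-- ===== PRECONDITION & SPEC =====
def Spec_solve (lst : List Int) (out : Int) : Prop := out = solve_alt lst
instance (lst : List Int) (out : Int) : Decidable (Spec_solve lst out) := by unfold Spec_solve; infer_instance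

-- ===== CLAIM (what is proved, stated in full; the proofs are below) =====
def Claim_equal_solve : Prop := ∀ (lst : List Int), Dom_solve lst → Spec_solve lst (solve lst)

-- ===== LEMMAS AND PROOFS =====

-- A's build loop equals the Counter loop (insert 1 on a fresh key = insert (0+1))
theorem buildA_eq_counter (lst : List Int) :
    lst.foldl (fun d ele =>
      if d.contains ele = false then d.insert ele 1
      else d.insert ele (d.getD ele 0 + 1)) PySem.Dict.empty = PySem.Dict.counter lst := by
  rw [← PySem.Dict.foldl_insert_getD_add_one_eq_counter]
  congr 1
  funext d ele
  by_cases h : d.contains ele = false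
  · rw [if_pos h, PySem.Dict.getD_of_not_contains d 0 h]; norm_num
  · rw [if_neg h]

theorem floordiv_two_natCast (m : Nat) :
    PySem.Int.floordiv (m : Int) 2 = ((m / 2 : Nat) : Int) := by
  exact_mod_cast PySem.Int.floordiv_natCast m 2

-- foldl accumulation of casts is the cast of a Nat map-sum
theorem foldl_add_map_sum (f : Int → Nat) :
    ∀ (keys : List Int) (p : Int),
      keys.foldl (fun pair k => pair + ((f k : Nat) : Int)) p = p + (((keys.map f).sum : Nat) : Int) := by
  intro keys
  induction keys with
  | nil => intro p; simp
  | cons k t ih => intro p; simp [List.foldl_cons, ih]; ring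

-- sums over two nodup key lists with the same membership agree
theorem map_sum_congr_nodup (f : Int → Nat) (l₁ l₂ : List Int)
    (h₁ : l₁.Nodup) (h₂ : l₂.Nodup) (hm : ∀ a, a ∈ l₁ ↔ a ∈ l₂) :
    (l₁.map f).sum = (l₂.map f).sum := by
  exact List.Perm.sum_eq (List.Perm.map f ((List.perm_ext_iff_of_nodup h₁ h₂).2 hm))

-- a sorted list with head x is a block of x's followed by strictly larger elements
theorem sorted_decomp :
    ∀ (t : List Int) (x : Int), (x :: t).Pairwise (· ≤ ·) →
      ∃ n r, x :: t = List.replicate (n + 1) x ++ r ∧ (∀ y ∈ r, x < y) ∧ r.Pairwise (· ≤ ·) := by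
  intro t
  induction t with
  | nil => intro x _; exact ⟨0, [], by simp, by simp, by simp⟩
  | cons y s ih =>
    intro x hp
    have hxy : x ≤ y := (List.pairwise_cons.1 hp).1 y (by simp)
    have hys : (y :: s).Pairwise (· ≤ ·) := (List.pairwise_cons.1 hp).2
    by_cases hxe : x = y
    · subst hxe
      obtain ⟨n, r, heq, hlt, hr⟩ := ih x hys
      refine ⟨n + 1, r, ?_, hlt, hr⟩
      rw [List.replicate_succ, List.cons_append, ← heq]
    · refine ⟨0, y :: s, by simp [List.replicate_succ], ?_, hys⟩
      intro z hz
      rcases List.mem_cons.1 hz with h | h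
      · omega
      · have := (List.pairwise_cons.1 hys).1 z h; omega

-- greedy scan over a block of n equal elements yields n/2 pairs
theorem pairsScan_replicate :
    ∀ (n : Nat) (x : Int) (r : List Int), (∀ y ∈ r, x < y) →
      pairsScan (List.replicate n x ++ r) = ((n / 2 : Nat) : Int) + pairsScan r := by
  intro n
  induction n using Nat.strong_induction_on with
  | _ n ih =>
    intro x r hr
    match n with
    | 0 => simp
    | 1 =>
      cases r with
      | nil => simp [pairsScan]
      | cons h t =>
        have : x ≠ h := by have := hr h (by simp); omega
        simp [pairsScan, this]
    | (m + 2) =>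
      have : List.replicate (m + 2) x ++ r = x :: x :: (List.replicate m x ++ r) := by
        simp [List.replicate_succ]
      rw [this]
      simp only [pairsScan, ih m (by omega) x r hr]; rw [if_pos trivial]
      have : ((m + 2) / 2 : Nat) = (m / 2 : Nat) + 1 := by omega
      rw [this]; push_cast; ring

theorem count_eq_zero_of_lt (x : Int) (r : List Int) (h : ∀ y ∈ r, x < y) :
    r.count x = 0 := by
  rw [List.count_eq_zero]
  intro hx
  have := h x hx; omega

-- main: greedy scan over a sorted list = sum of count/2 over the distinct values
theorem pairsScan_eq_sum :
    ∀ (N : Nat) (s : List Int), s.length ≤ N → s.Pairwise (· ≤ ·) →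
      pairsScan s = ((((PySem.Set.ofList s).map (fun k => s.count k / 2)).sum : Nat) : Int) := by
  intro N
  induction N with
  | zero =>
    intro s hlen _
    have : s = [] := List.eq_nil_of_length_eq_zero (by omega)
    subst this; simp [pairsScan, PySem.Set.ofList]
  | succ N ih =>
    intro s hlen hp
    cases s with
    | nil => simp [pairsScan, PySem.Set.ofList]
    | cons x t =>
      obtain ⟨n, r, heq, hlt, hr⟩ := sorted_decomp t x hp
      have hxr : x ∉ r := fun hx => by have := hlt x hx; omega
      have hlenr : r.length ≤ N := by
        have := congrArg List.length heq
        simp [List.length_replicate] at this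
        simp at hlen; omega
      rw [heq, pairsScan_replicate (n + 1) x r hlt, ih r hlenr hr]
      -- rewrite the RHS sum over Set.ofList (replicate (n+1) x ++ r)
      have hnodup1 : (PySem.Set.ofList (List.replicate (n + 1) x ++ r) : List Int).Nodup :=
        PySem.Set.nodup_ofList _
      have hnodup2 : (x :: (PySem.Set.ofList r : List Int)).Nodup := by
        refine List.nodup_cons.2 ⟨?_, PySem.Set.nodup_ofList _⟩
        rw [PySem.Set.mem_ofList]; exact hxr
      have hmem : ∀ a, a ∈ (PySem.Set.ofList (List.replicate (n + 1) x ++ r) : List Int) ↔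
          a ∈ x :: (PySem.Set.ofList r : List Int) := by
        intro a
        rw [PySem.Set.mem_ofList]
        simp [PySem.Set.mem_ofList, List.mem_replicate]
      set L := List.replicate (n + 1) x ++ r with hL
      rw [map_sum_congr_nodup (fun k => L.count k / 2) _ _ hnodup1 hnodup2 hmem]
      have hcx : L.count x = n + 1 := by
        rw [hL]
        simp [List.count_append, count_eq_zero_of_lt x r hlt]
      have hck : ∀ k ∈ (PySem.Set.ofList r : List Int), L.count k = r.count k := by
        intro k hk
        have hkr : k ∈ r := (PySem.Set.mem_ofList r k).1 hk
        have hxk : x < k := hlt k hkr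
        rw [hL]
        have h1 : ¬ (x = k) := by omega
        have h2 : ¬ (k = x) := by omega
        simp [List.count_append, List.count_replicate, h1]
      rw [List.map_cons, List.sum_cons, hcx]
      have : ((PySem.Set.ofList r : List Int).map (fun k => L.count k / 2)) =
          ((PySem.Set.ofList r : List Int).map (fun k => r.count k / 2)) :=
        List.map_congr_left (fun k hk => by rw [hck k hk])
      rw [this]
      push_cast; ring

-- ===== VERDICT (by name: the statement is the Claim_ definition above) =====
theorem solve_spec : Claim_equal_solve := by
  intro lst _
  unfold Spec_solve solve solve_alt
  rw [buildA_eq_counter]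
  simp only [PySem.Dict.keys_counter, PySem.Dict.getD_counter, floordiv_two_natCast]
  rw [foldl_add_map_sum (fun k => lst.count k / 2) (PySem.Set.ofList lst) 0, zero_add]
  set s := PySem.List.sorted lst (fun x => x) false with hs
  have hperm : s.Perm lst := PySem.List.sorted_perm lst (fun x => x) false
  have hpair : s.Pairwise (· ≤ ·) := by
    have := PySem.List.sorted_pairwise lst (fun x : Int => x) (κ := Int)
    simpa using this
  rw [pairsScan_eq_sum s.length s le_rfl hpair]
  have hcount : ∀ k : Int, s.count k = lst.count k := fun k => hperm.count_eq k
  simp only [hcount]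
  congr 1
  apply map_sum_congr_nodup _ _ _ (PySem.Set.nodup_ofList _) (PySem.Set.nodup_ofList _)
  intro a
  rw [PySem.Set.mem_ofList, PySem.Set.mem_ofList]
  exact hperm.mem_iff.symm
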